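-- pv_equiv track=rewrite | github.com/pbarros78/python-examples-and-test | controles y tareas/controles/control4/control4_4.py | calc
-- ===== SOURCE A (Python) =====
-- def calc(text, base):
--   i = 0
--   vow = 'aeiou'
--   cons = 'bcdefghijklmnopqrstuvwxyz'
--   while i < len(text) :
--     if text[i] in vow :
--       base = base - -5
--     elif text[i] in vow.upper():
--       base = base + -5
--     elif text[i] in cons :
--       base = base - 7
--     elif text[i] in cons.upper():
--       base = base - 9
--     else :
--       base = base - -3
--     i =  i + 1
--   return base
-- ===== SOURCE B (Python) =====
-- def calc(text, base):
--     vl = sum(1 for c in text if c in 'aeiou')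
--     vu = sum(1 for c in text if c in 'AEIOU')
--     cl = sum(1 for c in text if c in 'bcdfghjklmnpqrstvwxyz')
--     cu = sum(1 for c in text if c in 'BCDFGHJKLMNPQRSTVWXYZ')
--     other = len(text) - vl - vu - cl - cu
--     return base + 5 * vl - 5 * vu - 7 * cl - 9 * cu + 3 * other
-- ===== Notes on version B (the rewrite author's own statement) =====
-- stated objective: simpler
-- what changed: Replaces the stateful while-loop with per-character if/elif reassignment by four category counts (comprehension sums) plus a closed-form weighted sum, with the 'other' bucket computed as the complement of the classified counts.
import Mathlib
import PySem

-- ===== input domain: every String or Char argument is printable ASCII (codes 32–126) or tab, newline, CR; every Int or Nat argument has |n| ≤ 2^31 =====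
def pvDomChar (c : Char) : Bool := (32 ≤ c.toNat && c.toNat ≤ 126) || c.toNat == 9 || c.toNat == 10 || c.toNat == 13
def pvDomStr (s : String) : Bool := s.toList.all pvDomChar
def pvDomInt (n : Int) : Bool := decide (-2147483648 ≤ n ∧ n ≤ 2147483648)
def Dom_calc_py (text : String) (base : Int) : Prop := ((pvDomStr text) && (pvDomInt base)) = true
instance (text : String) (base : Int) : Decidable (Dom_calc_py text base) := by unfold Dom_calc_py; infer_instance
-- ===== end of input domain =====

-- B replaces A's stateful while-loop if/elif ladder by four category counts and a closed-form
-- weighted sum (objective: simpler).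

-- ===== PORT A =====
-- vow = 'aeiou'
def pvVowA : List Char := ['a', 'e', 'i', 'o', 'u']
-- vow.upper() = 'AEIOU'
def pvVowAU : List Char := ['A', 'E', 'I', 'O', 'U']
-- cons = 'bcdefghijklmnopqrstuvwxyz'
def pvConsA : List Char :=
  ['b','c','d','e','f','g','h','i','j','k','l','m','n','o','p','q','r','s','t','u','v','w','x','y','z']
-- cons.upper()
def pvConsAU : List Char :=
  ['B','C','D','E','F','G','H','I','J','K','L','M','N','O','P','Q','R','S','T','U','V','W','X','Y','Z']

-- one iteration of A's while-loop: the if/elif ladder updating base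
def pvCalcStep (base : Int) (c : Char) : Int :=
  if c ∈ pvVowA then base - (-5)
  else if c ∈ pvVowAU then base + (-5)
  else if c ∈ pvConsA then base - 7
  else if c ∈ pvConsAU then base - 9
  else base - (-3)

def calc_py (text : String) (base : Int) : Int :=
  text.toList.foldl pvCalcStep base

-- ===== PORT B =====
-- B's category strings: 'aeiou', 'AEIOU', 'bcdfghjklmnpqrstvwxyz', 'BCDFGHJKLMNPQRSTVWXYZ'
def pvBVowL : List Char := ['a', 'e', 'i', 'o', 'u']
def pvBVowU : List Char := ['A', 'E', 'I', 'O', 'U']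
def pvBConsL : List Char :=
  ['b','c','d','f','g','h','j','k','l','m','n','p','q','r','s','t','v','w','x','y','z']
def pvBConsU : List Char :=
  ['B','C','D','F','G','H','J','K','L','M','N','P','Q','R','S','T','V','W','X','Y','Z']

def calc_py_alt (text : String) (base : Int) : Int :=
  let cs := text.toList
  let vl : Int := cs.countP (fun c => decide (c ∈ pvBVowL))
  let vu : Int := cs.countP (fun c => decide (c ∈ pvBVowU))
  let cl : Int := cs.countP (fun c => decide (c ∈ pvBConsL))
  let cu : Int := cs.countP (fun c => decide (c ∈ pvBConsU))
  let other : Int := (cs.length : Int) - vl - vu - cl - cu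
  base + 5 * vl - 5 * vu - 7 * cl - 9 * cu + 3 * other

-- ===== PRECONDITION & SPEC =====
def Spec_calc_py (text : String) (base : Int) (out : Int) : Prop := out = calc_py_alt text base
instance (text : String) (base : Int) (out : Int) : Decidable (Spec_calc_py text base out) := by unfold Spec_calc_py; infer_instance

-- ===== CLAIM (what is proved, stated in full; the proofs are below) =====
def Claim_equal_calc_py : Prop := ∀ (text : String) (base : Int), Dom_calc_py text base → Spec_calc_py text base (calc_py text base)

-- ===== LEMMAS AND PROOFS =====

-- B's formula on a list of characters
def pvAltL (cs : List Char) (base : Int) : Int :=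
  let vl : Int := cs.countP (fun c => decide (c ∈ pvBVowL))
  let vu : Int := cs.countP (fun c => decide (c ∈ pvBVowU))
  let cl : Int := cs.countP (fun c => decide (c ∈ pvBConsL))
  let cu : Int := cs.countP (fun c => decide (c ∈ pvBConsU))
  base + 5 * vl - 5 * vu - 7 * cl - 9 * cu
    + 3 * ((cs.length : Int) - vl - vu - cl - cu)

lemma pvBConsL_iff (c : Char) : c ∈ pvBConsL ↔ (c ∈ pvConsA ∧ c ∉ pvVowA) := by
  constructor
  · intro h; fin_cases h <;> exact ⟨by decide, by decide⟩
  · rintro ⟨h1, h2⟩; fin_cases h1 <;> revert h2 <;> decide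

lemma pvBConsU_iff (c : Char) : c ∈ pvBConsU ↔ (c ∈ pvConsAU ∧ c ∉ pvVowAU) := by
  constructor
  · intro h; fin_cases h <;> exact ⟨by decide, by decide⟩
  · rintro ⟨h1, h2⟩; fin_cases h1 <;> revert h2 <;> decide

lemma pvVowA_notU (c : Char) (h : c ∈ pvVowA) : c ∉ pvVowAU ∧ c ∉ pvConsAU := by
  fin_cases h <;> exact ⟨by decide, by decide⟩

lemma pvVowAU_notL (c : Char) (h : c ∈ pvVowAU) : c ∉ pvConsA := by
  fin_cases h <;> decide

lemma pvConsA_notU (c : Char) (h : c ∈ pvConsA) : c ∉ pvConsAU := by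
  fin_cases h <;> decide

lemma pvAltL_step (c : Char) (t : List Char) (base : Int) :
    pvAltL t (pvCalcStep base c) = pvAltL (c :: t) base := by
  have e1 : pvBVowL = pvVowA := rfl
  have e2 : pvBVowU = pvVowAU := rfl
  by_cases h1 : c ∈ pvVowA
  · obtain ⟨h2a, h2b⟩ := pvVowA_notU c h1
    have h3 : c ∉ pvBConsL := fun hh => ((pvBConsL_iff c).1 hh).2 h1
    have h4 : c ∉ pvBConsU := fun hh => h2b ((pvBConsU_iff c).1 hh).1
    simp [pvAltL, pvCalcStep, h1, h2a, h3, h4, e1, e2]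
    ring
  · by_cases h2 : c ∈ pvVowAU
    · have h3 : c ∉ pvBConsL := fun hh => (pvVowAU_notL c h2) ((pvBConsL_iff c).1 hh).1
      have h4 : c ∉ pvBConsU := fun hh => ((pvBConsU_iff c).1 hh).2 h2
      simp [pvAltL, pvCalcStep, h1, h2, h3, h4, e1, e2]
      ring
    · by_cases h3 : c ∈ pvConsA
      · have h4 : c ∈ pvBConsL := (pvBConsL_iff c).2 ⟨h3, h1⟩
        have h5 : c ∉ pvBConsU := fun hh => (pvConsA_notU c h3) ((pvBConsU_iff c).1 hh).1
        simp [pvAltL, pvCalcStep, h1, h2, h3, h4, h5, e1, e2]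
        ring
      · by_cases h4 : c ∈ pvConsAU
        · have h5 : c ∉ pvBConsL := fun hh => h3 ((pvBConsL_iff c).1 hh).1
          have h6 : c ∈ pvBConsU := (pvBConsU_iff c).2 ⟨h4, h2⟩
          simp [pvAltL, pvCalcStep, h1, h2, h3, h4, h5, h6, e1, e2]
          ring
        · have h5 : c ∉ pvBConsL := fun hh => h3 ((pvBConsL_iff c).1 hh).1
          have h6 : c ∉ pvBConsU := fun hh => h4 ((pvBConsU_iff c).1 hh).1
          simp [pvAltL, pvCalcStep, h1, h2, h3, h4, h5, h6, e1, e2]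
          ring

lemma pvFoldl_eq_altL (cs : List Char) (base : Int) :
    cs.foldl pvCalcStep base = pvAltL cs base := by
  induction cs generalizing base with
  | nil => simp [pvAltL]
  | cons c t ih => simpa [List.foldl, ih] using pvAltL_step c t base

-- ===== VERDICT (by name: the statement is the Claim_ definition above) =====
theorem calc_py_spec : Claim_equal_calc_py := by
  intro text base _
  show calc_py text base = calc_py_alt text base
  simpa [calc_py, calc_py_alt, pvAltL] using pvFoldl_eq_altL text.toList base
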